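-- pv_equiv track=rewrite | github.com/IanBand/oeis-stuff | lpa.py | lpa1
-- ===== SOURCE A (Python) =====
-- def lpa1(n):
--     #lpa1(n) is self similar on intervals of 2^n
--
--     #convert n to binary string
--     bin_str = str(bin(n))[2:]
--
--     #count amount of 1s and 0s in the string
--     zeros = bin_str.count('0')
--     ones  = len(bin_str) - zeros
--
--     '''
--     #brute force to be a palindrome
--     if(ones % 2 == 1):
--         ones -= 1
--     '''
--
--     #construct largest palindromic anagram from an amount of 1s and 0s
--     pal = ""
--
--
--     #place all 0s in the middle of the string
--     for i in range(0, zeros):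
--         pal += '0'
--
--     #alternate placing the remaining 1s on either end of the string
--     for i in range(0, ones):
--
--         #if even, append '1' to left (msb)
--         if(i % 2 == 0):
--             pal = '1' + pal
--
--         #else append 1 to right (lsb)
--         else:
--             pal += '1'
--
--     #return integer value of the constructed palindrome
--     return int(pal, 2)
-- ===== SOURCE B (Python) =====
-- def lpa1(n):
--     # Same digit counting as A, then the palindrome's value computed arithmetically
--     # (shape: L ones | zeros zeros | R ones) with no string building at all.
--     bin_str = bin(n)[2:]
--     zeros = bin_str.count('0')
--     ones = len(bin_str) - zeros
--     L = (ones + 1) // 2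
--     R = ones // 2
--     return (2 ** L - 1) * 2 ** (zeros + R) + 2 ** R - 1
-- ===== Notes on version B (the rewrite author's own statement) =====
-- stated objective: simpler
-- what changed: B keeps A's digit counting but replaces A's two string-building loops and base-2 reparse with a closed-form integer formula (2^L-1)*2^(zeros+R)+2^R-1 for the palindrome's value.
import Mathlib
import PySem

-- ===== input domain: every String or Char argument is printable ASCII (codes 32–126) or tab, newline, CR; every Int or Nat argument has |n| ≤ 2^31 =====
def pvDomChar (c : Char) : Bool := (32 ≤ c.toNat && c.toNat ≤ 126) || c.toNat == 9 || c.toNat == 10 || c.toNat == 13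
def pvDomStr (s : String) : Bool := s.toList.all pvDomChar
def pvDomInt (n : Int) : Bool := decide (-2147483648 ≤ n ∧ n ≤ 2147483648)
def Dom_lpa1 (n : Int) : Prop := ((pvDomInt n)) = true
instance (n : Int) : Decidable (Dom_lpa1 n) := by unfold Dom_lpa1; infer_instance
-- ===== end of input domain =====

-- B replaces A's palindrome string-building loops and base-2 reparse by a closed-form
-- integer formula; the digit-counting step is identical (objective: simpler).

-- ===== PORT A =====
-- binary digits of m, msb first (hand port of Python's bin(); exact: bin(m) emits these digits)
def binDigits (m : Nat) : List Char :=
  if h : m = 0 then []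
  else binDigits (m / 2) ++ [if m % 2 = 1 then '1' else '0']
  decreasing_by exact Nat.div_lt_self (Nat.pos_of_ne_zero h) (by omega)

-- str(bin(n)) as a char list (hand port; exact: '-' sign, '0b' prefix, digits, bin(0)='0b0')
def pyBin (n : Int) : List Char :=
  (if n < 0 then ['-'] else []) ++ ['0', 'b'] ++
    (if n = 0 then ['0'] else binDigits n.natAbs)

def lpa1 (n : Int) : Int :=
  let bin_str := PySem.List.slice (pyBin n) (some 2) none      -- str(bin(n))[2:]
  let zeros : Int := bin_str.count '0'
  let ones : Int := (bin_str.length : Int) - zeros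
  let pal : List Char := []
  let pal := (PySem.List.pyRange 0 zeros 1).foldl (fun pal _ => pal ++ ['0']) pal
  let pal := (PySem.List.pyRange 0 ones 1).foldl
      (fun pal i => if PySem.Int.mod i 2 = 0 then '1' :: pal else pal ++ ['1']) pal
  -- int(pal, 2): hand port, exact here since pal is a nonempty '0'/'1' string
  pal.foldl (fun acc c => 2 * acc + (if c = '1' then 1 else 0)) 0

-- ===== PORT B =====
def lpa1_alt (n : Int) : Int :=
  let bin_str := PySem.List.slice (pyBin n) (some 2) none      -- bin(n)[2:]
  let zeros : Int := bin_str.count '0'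
  let ones : Int := (bin_str.length : Int) - zeros
  let L := PySem.Int.floordiv (ones + 1) 2
  let R := PySem.Int.floordiv ones 2
  (2 ^ L.toNat - 1) * 2 ^ (zeros + R).toNat + 2 ^ R.toNat - 1

-- ===== PRECONDITION & SPEC =====
def Spec_lpa1 (n : Int) (out : Int) : Prop := out = lpa1_alt n
instance (n : Int) (out : Int) : Decidable (Spec_lpa1 n out) := by unfold Spec_lpa1; infer_instance

-- ===== CLAIM (what is proved, stated in full; the proofs are below) =====
def Claim_equal_lpa1 : Prop := ∀ (n : Int), Dom_lpa1 n → Spec_lpa1 n (lpa1 n)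

-- ===== LEMMAS AND PROOFS =====

-- int(pal,2)'s fold over k ones, from any accumulator
theorem bitsFold_ones (k : Nat) (a : Int) :
    (List.replicate k '1').foldl (fun acc c => 2 * acc + (if c = '1' then 1 else 0)) a
      = a * 2 ^ k + (2 ^ k - 1) := by
  induction k generalizing a with
  | zero => simp
  | succ k ih =>
    rw [List.replicate_succ, List.foldl_cons]
    have h1 : (if ('1' : Char) = '1' then (1 : Int) else 0) = 1 := by decide
    rw [h1, ih]
    ring

-- int(pal,2)'s fold over k zeros, from any accumulator
theorem bitsFold_zeros (k : Nat) (a : Int) :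
    (List.replicate k '0').foldl (fun acc c => 2 * acc + (if c = '1' then 1 else 0)) a
      = a * 2 ^ k := by
  induction k generalizing a with
  | zero => simp
  | succ k ih =>
    rw [List.replicate_succ, List.foldl_cons]
    have h0 : (if ('0' : Char) = '1' then (1 : Int) else 0) = 0 := by decide
    rw [h0, ih]
    ring

-- A's zeros-loop builds exactly z zero characters
theorem zerosLoop (z : Nat) :
    (PySem.List.pyRange 0 (z : Int) 1).foldl (fun pal _ => pal ++ ['0']) ([] : List Char)
      = List.replicate z '0' := by
  rw [PySem.List.foldl_append_singleton_eq_map]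
  rw [List.eq_replicate_iff]
  simp [PySem.List.length_pyRange_one]

-- A's ones-loop wraps ceil(o/2) ones on the left and floor(o/2) ones on the right
theorem onesLoop (z o : Nat) :
    (PySem.List.pyRange 0 (o : Int) 1).foldl
        (fun pal i => if PySem.Int.mod i 2 = 0 then '1' :: pal else pal ++ ['1'])
        (List.replicate z '0')
      = List.replicate ((o + 1) / 2) '1' ++ List.replicate z '0' ++ List.replicate (o / 2) '1' := by
  induction o with
  | zero => simp [PySem.List.pyRange_one_eq_nil]
  | succ o ih =>
    have hcast : ((o + 1 : Nat) : Int) = (o : Int) + 1 := by push_cast; ring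
    rw [hcast, PySem.List.pyRange_one_succ_right (by positivity), List.foldl_append, ih]
    simp only [List.foldl_cons, List.foldl_nil]
    have hmod : PySem.Int.mod (o : Int) 2 = ((o % 2 : Nat) : Int) :=
      PySem.Int.mod_natCast o 2
    rcases Nat.even_or_odd o with he | ho
    · have h2 : o % 2 = 0 := Nat.even_iff.mp he
      have h0 : PySem.Int.mod (o : Int) 2 = 0 := by rw [hmod, h2]; norm_num
      rw [if_pos h0]
      have hL : (o + 1 + 1) / 2 = (o + 1) / 2 + 1 := by omega
      have hR : (o + 1) / 2 = o / 2 := by omega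
      rw [hL, hR]
      simp [List.replicate_succ]
    · have h2 : o % 2 = 1 := Nat.odd_iff.mp ho
      have h0 : PySem.Int.mod (o : Int) 2 ≠ 0 := by rw [hmod, h2]; norm_num
      rw [if_neg h0]
      have hL : (o + 1 + 1) / 2 = (o + 1) / 2 := by omega
      have hR : (o + 1) / 2 = o / 2 + 1 := by omega
      rw [hL, hR]
      simp [List.replicate_succ', List.append_assoc]

-- the whole computation agrees for any bin_str s, via its '0'-count z and '1'-count o
theorem core (z o : Nat) :
    ((PySem.List.pyRange 0 ((o : Nat) : Int) 1).foldl
        (fun pal i => if PySem.Int.mod i 2 = 0 then '1' :: pal else pal ++ ['1'])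
        ((PySem.List.pyRange 0 ((z : Nat) : Int) 1).foldl (fun pal _ => pal ++ ['0'])
          ([] : List Char))).foldl
        (fun acc c => 2 * acc + (if c = '1' then 1 else 0)) (0 : Int)
      = (2 ^ (PySem.Int.floordiv (((o : Nat) : Int) + 1) 2).toNat - 1)
          * 2 ^ (((z : Nat) : Int) + PySem.Int.floordiv ((o : Nat) : Int) 2).toNat
          + 2 ^ (PySem.Int.floordiv ((o : Nat) : Int) 2).toNat - 1 := by
  rw [zerosLoop, onesLoop, List.foldl_append, List.foldl_append,
      bitsFold_ones, bitsFold_zeros, bitsFold_ones]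
  have hL : PySem.Int.floordiv ((o : Int) + 1) 2 = (((o + 1) / 2 : Nat) : Int) := by
    have h := PySem.Int.floordiv_natCast (o + 1) 2
    push_cast at h ⊢
    omega
  have hR : PySem.Int.floordiv (o : Int) 2 = ((o / 2 : Nat) : Int) :=
    PySem.Int.floordiv_natCast o 2
  rw [hL, hR]
  have h1 : (((o + 1) / 2 : Nat) : Int).toNat = (o + 1) / 2 := by omega
  have h2 : ((o / 2 : Nat) : Int).toNat = o / 2 := by omega
  have h3 : ((z : Int) + ((o / 2 : Nat) : Int)).toNat = z + o / 2 := by omega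
  rw [h1, h2, h3]
  simp [pow_add]
  ring

-- ===== VERDICT (by name: the statement is the Claim_ definition above) =====
theorem lpa1_spec : Claim_equal_lpa1 := by
  intro n _
  unfold Spec_lpa1 lpa1 lpa1_alt
  dsimp only
  generalize PySem.List.slice (pyBin n) (some 2) none = s
  have hz : s.count '0' ≤ s.length := List.count_le_length
  have ho : (s.length : Int) - (s.count '0' : Int) = ((s.length - s.count '0' : Nat) : Int) := by
    omega
  rw [ho]
  exact core (s.count '0') (s.length - s.count '0')
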